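-- pv_equiv track=rewrite | github.com/Udostan/Autowave-Deploy | app/agents/super_agent.py | _find_multiple_relevant_links
-- ===== SOURCE A (Python) =====
-- def _find_multiple_relevant_links(links, search_query, max_links=3):
--     """
--     Find multiple relevant links from a list of links based on a search query.
--
--     Args:
--         links (list): A list of link dictionaries
--         search_query (str): The search query
--         max_links (int): Maximum number of links to return
--
--     Returns:
--         list: A list of indices of relevant links
--     """
--     search_terms = search_query.lower().split()
--     relevant_indices = []
--
--     # Skip common navigation links
--     skip_patterns = [
--         'sign in', 'login', 'register', 'help', 'about', 'contact', 'privacy', 'terms',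
--         'cookie', 'advertis', 'feedback', 'support', 'account', 'preferences', 'settings',
--         'language', 'country', 'region', 'map', 'image', 'video', 'news', 'shopping',
--         'books', 'flights', 'hotel', 'menu', 'navigation', 'search', 'advanced', 'tools',
--         'all', 'clear', 'remove', 'delete', 'cancel', 'close', 'next', 'previous', 'more',
--         'less', 'show', 'hide', 'expand', 'collapse', 'open', 'close', 'toggle', 'switch'
--     ]
--
--     # First, look for links that match all search terms
--     for i, link in enumerate(links):
--         if len(relevant_indices) >= max_links:
--             break
--
--         link_text = link.get('text', '').lower()
--         link_url = link.get('url', '').lower()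
--
--         # Skip links with common navigation patterns
--         if any(pattern in link_text for pattern in skip_patterns):
--             continue
--
--         # Check if all search terms are in the link text or URL
--         if all(term in link_text or term in link_url for term in search_terms):
--             relevant_indices.append(i)
--
--     # If we need more links, look for links that match at least one search term
--     if len(relevant_indices) < max_links:
--         for i, link in enumerate(links):
--             if i in relevant_indices or len(relevant_indices) >= max_links:
--                 continue
--
--             link_text = link.get('text', '').lower()
--             link_url = link.get('url', '').lower()
--
--             # Skip links with common navigation patterns
--             if any(pattern in link_text for pattern in skip_patterns):
--                 continue
--
--             # Check if any search term is in the link text or URL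
--             if any(term in link_text or term in link_url for term in search_terms):
--                 relevant_indices.append(i)
--
--     # If we still need more links, add the first few links that aren't navigation links
--     if len(relevant_indices) < max_links:
--         for i, link in enumerate(links):
--             if i in relevant_indices or len(relevant_indices) >= max_links:
--                 continue
--
--             link_text = link.get('text', '').lower()
--
--             # Skip links with common navigation patterns
--             if any(pattern in link_text for pattern in skip_patterns):
--                 continue
--
--             relevant_indices.append(i)
--
--     # If all else fails and we have no links, return the first few links
--     if not relevant_indices and links:
--         relevant_indices = list(range(min(max_links, len(links))))
--
--     return relevant_indices
-- ===== SOURCE B (Python) =====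
-- def _find_multiple_relevant_links(links, search_query, max_links=3):
--     """Single-pass bucket version: classify each non-navigation link once
--     (full match / partial match / no match), then concatenate the buckets and
--     take the first max_links indices; same fallback as the original."""
--     skip_patterns = [
--         'sign in', 'login', 'register', 'help', 'about', 'contact', 'privacy', 'terms',
--         'cookie', 'advertis', 'feedback', 'support', 'account', 'preferences', 'settings',
--         'language', 'country', 'region', 'map', 'image', 'video', 'news', 'shopping',
--         'books', 'flights', 'hotel', 'menu', 'navigation', 'search', 'advanced', 'tools',
--         'all', 'clear', 'remove', 'delete', 'cancel', 'close', 'next', 'previous', 'more',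
--         'less', 'show', 'hide', 'expand', 'collapse', 'open', 'close', 'toggle', 'switch'
--     ]
--     terms = search_query.lower().split()
--     full, partial, plain = [], [], []
--     for i, link in enumerate(links):
--         text = link.get('text', '').lower()
--         if any(p in text for p in skip_patterns):
--             continue
--         url = link.get('url', '').lower()
--         hits = sum(1 for t in terms if t in text or t in url)
--         if hits == len(terms):
--             full.append(i)
--         elif hits > 0:
--             partial.append(i)
--         else:
--             plain.append(i)
--     result = (full + partial + plain)[:max(0, max_links)]
--     if not result and links:
--         result = list(range(min(max_links, len(links))))
--     return result
-- ===== Notes on version B (the rewrite author's own statement) =====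
-- stated objective: simpler
-- what changed: Replaced A's three separate capped re-scans of the links (all-terms pass, any-term pass with membership re-checks, leftover pass) by a single classifying pass that puts each non-navigation link into one of three priority buckets, then concatenates the buckets and truncates once.
import Mathlib
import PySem

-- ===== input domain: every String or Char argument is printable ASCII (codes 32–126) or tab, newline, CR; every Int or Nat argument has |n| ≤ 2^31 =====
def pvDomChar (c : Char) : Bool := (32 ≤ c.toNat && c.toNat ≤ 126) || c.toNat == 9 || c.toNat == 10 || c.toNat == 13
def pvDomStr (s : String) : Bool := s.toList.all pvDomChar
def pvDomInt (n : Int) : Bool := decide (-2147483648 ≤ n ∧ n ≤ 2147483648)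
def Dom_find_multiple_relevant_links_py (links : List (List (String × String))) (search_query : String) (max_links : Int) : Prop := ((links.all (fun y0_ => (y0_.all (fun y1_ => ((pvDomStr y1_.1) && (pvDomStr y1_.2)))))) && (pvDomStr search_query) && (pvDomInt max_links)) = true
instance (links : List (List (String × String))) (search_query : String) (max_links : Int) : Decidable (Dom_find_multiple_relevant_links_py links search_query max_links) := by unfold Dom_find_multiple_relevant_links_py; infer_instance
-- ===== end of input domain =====

-- B replaces A's three capped scans over the links by a single classifying pass into three
-- priority buckets, concatenated and truncated once (objective: simpler).

-- skip_patterns: the identical literal list both Python versions carry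
def pvSkipPatterns : List String :=
  ["sign in", "login", "register", "help", "about", "contact", "privacy", "terms",
   "cookie", "advertis", "feedback", "support", "account", "preferences", "settings",
   "language", "country", "region", "map", "image", "video", "news", "shopping",
   "books", "flights", "hotel", "menu", "navigation", "search", "advanced", "tools",
   "all", "clear", "remove", "delete", "cancel", "close", "next", "previous", "more",
   "less", "show", "hide", "expand", "collapse", "open", "close", "toggle", "switch"]

-- ===== PORT A =====
-- first loop: links matching all search terms, break at max_links
def pvA_pass1 (links : List (List (String × String))) (terms : List String) (m : Int)
    (i : Int) (acc : List Int) : List Int :=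
  match links with
  | [] => acc
  | link :: rest =>
    if m ≤ (acc.length : Int) then acc  -- break
    else
      let text := PySem.Str.lower (PySem.Dict.getD ⟨link⟩ "text" "")
      let url := PySem.Str.lower (PySem.Dict.getD ⟨link⟩ "url" "")
      if pvSkipPatterns.any (fun p => PySem.Str.isIn p text) then
        pvA_pass1 rest terms m (i + 1) acc
      else if terms.all (fun t => PySem.Str.isIn t text || PySem.Str.isIn t url) then
        pvA_pass1 rest terms m (i + 1) (acc ++ [i])
      else
        pvA_pass1 rest terms m (i + 1) acc

-- second loop: links matching at least one term, skipping ones already taken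
def pvA_pass2 (links : List (List (String × String))) (terms : List String) (m : Int)
    (i : Int) (acc : List Int) : List Int :=
  match links with
  | [] => acc
  | link :: rest =>
    if acc.contains i || m ≤ (acc.length : Int) then pvA_pass2 rest terms m (i + 1) acc
    else
      let text := PySem.Str.lower (PySem.Dict.getD ⟨link⟩ "text" "")
      let url := PySem.Str.lower (PySem.Dict.getD ⟨link⟩ "url" "")
      if pvSkipPatterns.any (fun p => PySem.Str.isIn p text) then
        pvA_pass2 rest terms m (i + 1) acc
      else if terms.any (fun t => PySem.Str.isIn t text || PySem.Str.isIn t url) then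
        pvA_pass2 rest terms m (i + 1) (acc ++ [i])
      else
        pvA_pass2 rest terms m (i + 1) acc

-- third loop: any remaining non-navigation links
def pvA_pass3 (links : List (List (String × String))) (terms : List String) (m : Int)
    (i : Int) (acc : List Int) : List Int :=
  match links with
  | [] => acc
  | link :: rest =>
    if acc.contains i || m ≤ (acc.length : Int) then pvA_pass3 rest terms m (i + 1) acc
    else
      let text := PySem.Str.lower (PySem.Dict.getD ⟨link⟩ "text" "")
      if pvSkipPatterns.any (fun p => PySem.Str.isIn p text) then
        pvA_pass3 rest terms m (i + 1) acc
      else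
        pvA_pass3 rest terms m (i + 1) (acc ++ [i])

def find_multiple_relevant_links_py (links : List (List (String × String))) (search_query : String) (max_links : Int) : List Int :=
  let search_terms := PySem.Str.split₀ (PySem.Str.lower search_query)
  let r1 := pvA_pass1 links search_terms max_links 0 []
  let r2 := if (r1.length : Int) < max_links then pvA_pass2 links search_terms max_links 0 r1 else r1
  let r3 := if (r2.length : Int) < max_links then pvA_pass3 links search_terms max_links 0 r2 else r2
  if r3.isEmpty && !links.isEmpty then
    PySem.List.pyRange 0 (min max_links (links.length : Int)) 1
  else r3

-- ===== PORT B =====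
-- single pass: classify every non-navigation link into (full, partial, plain)
def pvB_buckets (links : List (List (String × String))) (terms : List String)
    (i : Int) : List Int × List Int × List Int :=
  match links with
  | [] => ([], [], [])
  | link :: rest =>
    let text := PySem.Str.lower (PySem.Dict.getD ⟨link⟩ "text" "")
    if pvSkipPatterns.any (fun p => PySem.Str.isIn p text) then
      pvB_buckets rest terms (i + 1)
    else
      let url := PySem.Str.lower (PySem.Dict.getD ⟨link⟩ "url" "")
      let hits := terms.countP (fun t => PySem.Str.isIn t text || PySem.Str.isIn t url)
      let (f, p, pl) := pvB_buckets rest terms (i + 1)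
      if hits = terms.length then (i :: f, p, pl)
      else if 0 < hits then (f, i :: p, pl)
      else (f, p, i :: pl)

def find_multiple_relevant_links_py_alt (links : List (List (String × String))) (search_query : String) (max_links : Int) : List Int :=
  let terms := PySem.Str.split₀ (PySem.Str.lower search_query)
  let (f, p, pl) := pvB_buckets links terms 0
  -- (full + partial + plain)[:max(0, max_links)]
  let result := PySem.List.slice (f ++ p ++ pl) none (some (max 0 max_links))
  if result.isEmpty && !links.isEmpty then
    PySem.List.pyRange 0 (min max_links (links.length : Int)) 1
  else result

-- ===== PRECONDITION & SPEC =====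
def Spec_find_multiple_relevant_links_py (links : List (List (String × String))) (search_query : String) (max_links : Int) (out : List Int) : Prop := out = find_multiple_relevant_links_py_alt links search_query max_links
instance (links : List (List (String × String))) (search_query : String) (max_links : Int) (out : List Int) : Decidable (Spec_find_multiple_relevant_links_py links search_query max_links out) := by unfold Spec_find_multiple_relevant_links_py; infer_instance

-- ===== CLAIM (what is proved, stated in full; the proofs are below) =====
def Claim_equal_find_multiple_relevant_links_py : Prop := ∀ (links : List (List (String × String))) (search_query : String) (max_links : Int), Dom_find_multiple_relevant_links_py links search_query max_links → Spec_find_multiple_relevant_links_py links search_query max_links (find_multiple_relevant_links_py links search_query max_links)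

-- ===== LEMMAS AND PROOFS =====

theorem pvB_buckets_ge (links : List (List (String × String))) (terms : List String)
    (i : Int) (x : Int) :
    (x ∈ (pvB_buckets links terms i).1 ∨ x ∈ (pvB_buckets links terms i).2.1 ∨
     x ∈ (pvB_buckets links terms i).2.2) → i ≤ x := by
  induction links generalizing i with
  | nil => simp [pvB_buckets]
  | cons link rest ih =>
    have ih' := ih (i+1)
    simp only [pvB_buckets]
    rcases hb : pvB_buckets rest terms (i+1) with ⟨f, p, pl⟩
    rw [hb] at ih'
    split
    · intro h; have := ih' h; omega
    · simp only []
      split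
      · rintro (h | h | h)
        · rcases List.mem_cons.mp h with rfl | h
          · omega
          · have := ih' (Or.inl h); omega
        · have := ih' (Or.inr (Or.inl h)); omega
        · have := ih' (Or.inr (Or.inr h)); omega
      · split
        · rintro (h | h | h)
          · have := ih' (Or.inl h); omega
          · rcases List.mem_cons.mp h with rfl | h
            · omega
            · have := ih' (Or.inr (Or.inl h)); omega
          · have := ih' (Or.inr (Or.inr h)); omega
        · rintro (h | h | h)
          · have := ih' (Or.inl h); omega
          · have := ih' (Or.inr (Or.inl h)); omega
          · rcases List.mem_cons.mp h with rfl | h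
            · omega
            · have := ih' (Or.inr (Or.inr h)); omega
theorem pvB_buckets_disj (links : List (List (String × String))) (terms : List String)
    (i : Int) (x : Int) :
    (x ∈ (pvB_buckets links terms i).1 → x ∉ (pvB_buckets links terms i).2.1 ∧ x ∉ (pvB_buckets links terms i).2.2) ∧
    (x ∈ (pvB_buckets links terms i).2.1 → x ∉ (pvB_buckets links terms i).2.2) := by
  induction links generalizing i with
  | nil => simp [pvB_buckets]
  | cons link rest ih =>
    have ih' := ih (i+1)
    have hge := pvB_buckets_ge rest terms (i+1)
    simp only [pvB_buckets]
    rcases hb : pvB_buckets rest terms (i+1) with ⟨f, p, pl⟩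
    rw [hb] at ih'
    rw [hb] at hge
    split
    · exact ih'
    · simp only []
      split
      · constructor
        · intro h
          rcases List.mem_cons.mp h with rfl | h
          · constructor
            · intro hc; have := hge x (Or.inr (Or.inl hc)); omega
            · intro hc; have := hge x (Or.inr (Or.inr hc)); omega
          · exact ih'.1 h
        · exact ih'.2
      · split
        · constructor
          · intro h
            refine ⟨?_, ih'.1 h |>.2⟩
            intro hc
            rcases List.mem_cons.mp hc with rfl | hc
            · have := hge x (Or.inl h); omega
            · exact (ih'.1 h).1 hc
          · intro h
            rcases List.mem_cons.mp h with rfl | h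
            · intro hc; have := hge x (Or.inr (Or.inr hc)); omega
            · exact ih'.2 h
        · constructor
          · intro h
            refine ⟨ih'.1 h |>.1, ?_⟩
            intro hc
            rcases List.mem_cons.mp hc with rfl | hc
            · have := hge x (Or.inl h); omega
            · exact (ih'.1 h).2 hc
          · intro h hc
            rcases List.mem_cons.mp hc with rfl | hc
            · have := hge x (Or.inr (Or.inl h)); omega
            · exact ih'.2 h hc
theorem pvA_pass1_eq (links : List (List (String × String))) (terms : List String) (m : Int)
    (i : Int) (acc : List Int) :
    pvA_pass1 links terms m i acc =
      acc ++ (pvB_buckets links terms i).1.take ((m - acc.length).toNat) := by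
  induction links generalizing i acc with
  | nil => simp [pvA_pass1, pvB_buckets]
  | cons link rest ih =>
    simp only [pvA_pass1, pvB_buckets]
    rcases hb : pvB_buckets rest terms (i+1) with ⟨f, p, pl⟩
    by_cases hcap : m ≤ (acc.length : Int)
    · rw [if_pos hcap]
      have h0 : (m - (acc.length : Int)).toNat = 0 := by omega
      split_ifs <;> simp [h0]
    · rw [if_neg hcap]
      have ih' := ih (i+1)
      rw [hb] at ih'
      by_cases hnav : (pvSkipPatterns.any (fun pat => PySem.Str.isIn pat (PySem.Str.lower (PySem.Dict.getD ⟨link⟩ "text" ""))) = true)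
      · simp only [if_pos hnav]
        exact ih' acc
      · simp only [if_neg hnav]
        set pred := fun t => PySem.Str.isIn t (PySem.Str.lower (PySem.Dict.getD ⟨link⟩ "text" "")) || PySem.Str.isIn t (PySem.Str.lower (PySem.Dict.getD ⟨link⟩ "url" "")) with hpred
        by_cases hall : (terms.all pred = true)
        · rw [if_pos hall]
          have hcnt : terms.countP pred = terms.length :=
            List.countP_eq_length.mpr (by simpa using List.all_eq_true.mp hall)
        -- bucket head is i
          simp only [if_pos hcnt]
          have hlen : ((acc ++ [i]).length : Int) = (acc.length : Int) + 1 := by simp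
          have hsucc : (m - (acc.length : Int)).toNat = (m - ((acc ++ [i]).length : Int)).toNat + 1 := by
            rw [hlen]; omega
          rw [hsucc, List.take_succ_cons, ih' (acc ++ [i])]
          simp
        · rw [if_neg hall]
          have hcnt : ¬ (terms.countP pred = terms.length) := by
            intro hc
            exact hall (List.all_eq_true.mpr (by simpa using List.countP_eq_length.mp hc))
          simp only [if_neg hcnt]
          by_cases hpos : 0 < terms.countP pred
          · simp only [if_pos hpos]; exact ih' acc
          · simp only [if_neg hpos]; exact ih' acc
theorem pvA_pass2_eq (links : List (List (String × String))) (terms : List String) (m : Int)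
    (i : Int) (acc : List Int)
    (h2 : ∀ x ∈ (pvB_buckets links terms i).1, x ∈ acc)
    (h1 : ∀ x ∈ acc, x ∉ (pvB_buckets links terms i).2.1) :
    pvA_pass2 links terms m i acc =
      acc ++ (pvB_buckets links terms i).2.1.take ((m - acc.length).toNat) := by
  induction links generalizing i acc with
  | nil => simp [pvA_pass2, pvB_buckets]
  | cons link rest ih =>
    have hge := pvB_buckets_ge rest terms (i+1)
    simp only [pvB_buckets] at h2 h1 ⊢
    simp only [pvA_pass2]
    rcases hb : pvB_buckets rest terms (i+1) with ⟨f, p, pl⟩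
    rw [hb] at h2 h1 hge
    have ih' : ∀ acc' : List Int, (∀ x ∈ f, x ∈ acc') → (∀ x ∈ acc', x ∉ p) →
        pvA_pass2 rest terms m (i+1) acc' = acc' ++ p.take ((m - acc'.length).toNat) := by
      intro acc' ha hbp
      have := ih (i+1) acc' (by rw [hb]; exact ha) (by rw [hb]; exact hbp)
      rwa [hb] at this
    by_cases hnav : (pvSkipPatterns.any (fun pat => PySem.Str.isIn pat (PySem.Str.lower (PySem.Dict.getD ⟨link⟩ "text" ""))) = true)
    · simp only [if_pos hnav] at h2 h1 ⊢
      split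
      · exact ih' acc h2 h1
      · exact ih' acc h2 h1
    · simp only [if_neg hnav] at h2 h1 ⊢
      set pred := fun t => PySem.Str.isIn t (PySem.Str.lower (PySem.Dict.getD ⟨link⟩ "text" "")) || PySem.Str.isIn t (PySem.Str.lower (PySem.Dict.getD ⟨link⟩ "url" "")) with hpred
      by_cases hcnt : (terms.countP pred = terms.length)
      · simp only [if_pos hcnt] at h2 h1 ⊢
        have hiacc : i ∈ acc := h2 i (List.mem_cons_self ..)
        have hcond : (acc.contains i || decide (m ≤ (acc.length : Int))) = true := by
          simp [hiacc]
        simp only [hcond]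
        exact ih' acc (fun x hx => h2 x (List.mem_cons_of_mem _ hx)) h1
      · simp only [if_neg hcnt] at h2 h1 ⊢
        by_cases hpos : 0 < terms.countP pred
        · simp only [if_pos hpos] at h2 h1 ⊢
          have hiacc : i ∉ acc := fun hc => h1 i hc (List.mem_cons_self ..)
          by_cases hcap : m ≤ (acc.length : Int)
          · have hcond : (acc.contains i || decide (m ≤ (acc.length : Int))) = true := by
              simp [hcap]
            simp only [hcond]
            have h0 : (m - (acc.length : Int)).toNat = 0 := by omega
            have := ih' acc h2 (fun x hx hc => h1 x hx (List.mem_cons_of_mem _ hc))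
            simp [this, h0]
          · have hcond : (acc.contains i || decide (m ≤ (acc.length : Int))) = false := by
              simp [hiacc, hcap]
            simp only [hcond, Bool.false_eq_true, if_false]
            have hany : (terms.any pred = true) := by
              rcases List.countP_pos_iff.mp hpos with ⟨a, ha, hpa⟩
              exact List.any_eq_true.mpr ⟨a, ha, hpa⟩
            simp only [if_pos hany]
            have hsucc : (m - (acc.length : Int)).toNat = (m - ((acc ++ [i]).length : Int)).toNat + 1 := by
              simp; omega
            rw [hsucc, List.take_succ_cons]
            have := ih' (acc ++ [i])
              (fun x hx => List.mem_append_left _ (h2 x hx))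
              (fun x hx hc => by
                rcases List.mem_append.mp hx with hx | hx
                · exact h1 x hx (List.mem_cons_of_mem _ hc)
                · have hxi : x = i := by simpa using hx
                  subst hxi
                  have := hge x (Or.inr (Or.inl hc)); omega)
            rw [this]
            simp
        · simp only [if_neg hpos] at h2 h1 ⊢
          have hany : (terms.any pred = false) := by
            rw [List.any_eq_false]
            intro a ha hpa
            exact hpos (List.countP_pos_iff.mpr ⟨a, ha, hpa⟩)
          split
          · exact ih' acc h2 h1
          · simp only [hany, Bool.false_eq_true, if_false]
            exact ih' acc h2 h1
theorem pvA_pass3_eq (links : List (List (String × String))) (terms : List String) (m : Int)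
    (i : Int) (acc : List Int)
    (h2 : ∀ x ∈ (pvB_buckets links terms i).1, x ∈ acc)
    (h1 : ∀ x ∈ (pvB_buckets links terms i).2.1, x ∈ acc)
    (h0 : ∀ x ∈ acc, x ∉ (pvB_buckets links terms i).2.2) :
    pvA_pass3 links terms m i acc =
      acc ++ (pvB_buckets links terms i).2.2.take ((m - acc.length).toNat) := by
  induction links generalizing i acc with
  | nil => simp [pvA_pass3, pvB_buckets]
  | cons link rest ih =>
    have hge := pvB_buckets_ge rest terms (i+1)
    simp only [pvB_buckets] at h2 h1 h0 ⊢
    simp only [pvA_pass3]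
    rcases hb : pvB_buckets rest terms (i+1) with ⟨f, p, pl⟩
    rw [hb] at h2 h1 h0 hge
    have ih' : ∀ acc' : List Int, (∀ x ∈ f, x ∈ acc') → (∀ x ∈ p, x ∈ acc') → (∀ x ∈ acc', x ∉ pl) →
        pvA_pass3 rest terms m (i+1) acc' = acc' ++ pl.take ((m - acc'.length).toNat) := by
      intro acc' ha hbp hcp
      have := ih (i+1) acc' (by rw [hb]; exact ha) (by rw [hb]; exact hbp) (by rw [hb]; exact hcp)
      rwa [hb] at this
    by_cases hnav : (pvSkipPatterns.any (fun pat => PySem.Str.isIn pat (PySem.Str.lower (PySem.Dict.getD ⟨link⟩ "text" ""))) = true)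
    · simp only [if_pos hnav] at h2 h1 h0 ⊢
      split
      · exact ih' acc h2 h1 h0
      · exact ih' acc h2 h1 h0
    · simp only [if_neg hnav] at h2 h1 h0 ⊢
      set pred := fun t => PySem.Str.isIn t (PySem.Str.lower (PySem.Dict.getD ⟨link⟩ "text" "")) || PySem.Str.isIn t (PySem.Str.lower (PySem.Dict.getD ⟨link⟩ "url" "")) with hpred
      by_cases hcnt : (terms.countP pred = terms.length)
      · simp only [if_pos hcnt] at h2 h1 h0 ⊢
        have hiacc : i ∈ acc := h2 i (List.mem_cons_self ..)
        have hcond : (acc.contains i || decide (m ≤ (acc.length : Int))) = true := by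
          simp [hiacc]
        simp only [hcond, if_true]
        exact ih' acc (fun x hx => h2 x (List.mem_cons_of_mem _ hx)) h1 h0
      · simp only [if_neg hcnt] at h2 h1 h0 ⊢
        by_cases hpos : 0 < terms.countP pred
        · simp only [if_pos hpos] at h2 h1 h0 ⊢
          have hiacc : i ∈ acc := h1 i (List.mem_cons_self ..)
          have hcond : (acc.contains i || decide (m ≤ (acc.length : Int))) = true := by
            simp [hiacc]
          simp only [hcond, if_true]
          exact ih' acc h2 (fun x hx => h1 x (List.mem_cons_of_mem _ hx)) h0
        · simp only [if_neg hpos] at h2 h1 h0 ⊢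
          have hiacc : i ∉ acc := fun hc => h0 i hc (List.mem_cons_self ..)
          by_cases hcap : m ≤ (acc.length : Int)
          · have hcond : (acc.contains i || decide (m ≤ (acc.length : Int))) = true := by
              simp [hcap]
            simp only [hcond, if_true]
            have hh0 : (m - (acc.length : Int)).toNat = 0 := by omega
            have := ih' acc h2 h1 (fun x hx hc => h0 x hx (List.mem_cons_of_mem _ hc))
            simp [this, hh0]
          · have hcond : (acc.contains i || decide (m ≤ (acc.length : Int))) = false := by
              simp [hiacc, hcap]
            simp only [hcond, Bool.false_eq_true, if_false]
            have hsucc : (m - (acc.length : Int)).toNat = (m - ((acc ++ [i]).length : Int)).toNat + 1 := by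
              simp; omega
            rw [hsucc, List.take_succ_cons]
            have := ih' (acc ++ [i])
              (fun x hx => List.mem_append_left _ (h2 x hx))
              (fun x hx => List.mem_append_left _ (h1 x hx))
              (fun x hx hc => by
                rcases List.mem_append.mp hx with hx | hx
                · exact h0 x hx (List.mem_cons_of_mem _ hc)
                · have hxi : x = i := by simpa using hx
                  subst hxi
                  have := hge x (Or.inr (Or.inr hc)); omega)
            rw [this]
            simp

-- ===== VERDICT (by name: the statement is the Claim_ definition above) =====
theorem find_multiple_relevant_links_py_spec : Claim_equal_find_multiple_relevant_links_py := by
  intro links search_query max_links _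
  unfold Spec_find_multiple_relevant_links_py
  simp only [find_multiple_relevant_links_py, find_multiple_relevant_links_py_alt]
  set terms := PySem.Str.split₀ (PySem.Str.lower search_query) with hterms
  set m := max_links
  rcases hb : pvB_buckets links terms 0 with ⟨F, P, PL⟩
  have hdisj := pvB_buckets_disj links terms 0
  rw [hb] at hdisj
  have hmax : (max 0 m).toNat = m.toNat := by omega
  have hslice : PySem.List.slice (F ++ P ++ PL) none (some (max 0 m)) = (F ++ P ++ PL).take m.toNat := by
    rw [PySem.List.slice_to _ (le_max_left 0 m), hmax]
  -- r1
  have hr1 : pvA_pass1 links terms m 0 [] = F.take m.toNat := by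
    have := pvA_pass1_eq links terms m 0 []
    rw [hb] at this
    simpa using this
  rw [hr1, hslice]
  have hlen1 : (F.take m.toNat).length = min m.toNat F.length := by simp
  by_cases hm1 : ((F.take m.toNat).length : Int) < m
  · rw [if_pos hm1]
    have hmpos : 0 < m := by
      have : (0:Int) ≤ ((F.take m.toNat).length : Int) := by positivity
      omega
    have hFlt : F.length < m.toNat := by
      rw [hlen1] at hm1; omega
    have hr1F : F.take m.toNat = F := List.take_of_length_le (by omega)
    rw [hr1F]
    have hr2 : pvA_pass2 links terms m 0 F = F ++ P.take ((m - F.length).toNat) := by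
      have := pvA_pass2_eq links terms m 0 F (by rw [hb]; intro x hx; exact hx)
        (by rw [hb]; intro x hx; exact (hdisj x).1 hx |>.1)
      rw [hb] at this
      exact this
    rw [hr2]
    have hlen2 : (F ++ P.take ((m - F.length).toNat)).length = F.length + min (m - F.length).toNat P.length := by simp
    by_cases hm2 : (((F ++ P.take ((m - F.length).toNat)).length : Int) < m)
    · rw [if_pos hm2]
      have hPlt : P.length < (m - (F.length : Int)).toNat := by
        rw [hlen2] at hm2; push_cast at hm2; omega
      have hPfull : P.take ((m - (F.length : Int)).toNat) = P := List.take_of_length_le (by omega)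
      rw [hPfull]
      have hr3 : pvA_pass3 links terms m 0 (F ++ P) = (F ++ P) ++ PL.take ((m - ((F ++ P).length : Int)).toNat) := by
        have := pvA_pass3_eq links terms m 0 (F ++ P)
          (by rw [hb]; intro x hx; exact List.mem_append_left _ hx)
          (by rw [hb]; intro x hx; exact List.mem_append_right _ hx)
          (by rw [hb]; intro x hx
              rcases List.mem_append.mp hx with hx | hx
              · exact ((hdisj x).1 hx).2
              · exact (hdisj x).2 hx)
        rw [hb] at this
        exact this
      rw [hr3]
      have heq : (F ++ P) ++ PL.take ((m - ((F ++ P).length : Int)).toNat) = ((F ++ P) ++ PL).take m.toNat := by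
        rw [List.take_append]
        have : (F ++ P).take m.toNat = F ++ P := List.take_of_length_le (by simp; omega)
        rw [this]
        congr 1
        congr 1
        simp
        omega
      rw [heq]
    · rw [if_neg hm2]
      -- r2 is final
      rw [List.take_append]
      have hF : (F ++ P).take m.toNat = F ++ P.take (m.toNat - F.length) := by
        rw [List.take_append, List.take_of_length_le (by omega)]
      have hnPL : PL.take (m.toNat - (F ++ P).length) = [] := by
        rw [hlen2] at hm2; push_cast at hm2
        have : m.toNat - (F ++ P).length = 0 := by simp; omega
        rw [this, List.take_zero]
      rw [hF, hnPL, List.append_nil]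
      have : (m - (F.length : Int)).toNat = m.toNat - F.length := by omega
      rw [this]
  · rw [if_neg hm1, if_neg hm1]
    have hFP : List.take m.toNat (F ++ P ++ PL) = List.take m.toNat F := by
      by_cases hm0 : m ≤ 0
      · have h0 : m.toNat = 0 := by omega
        rw [h0, List.take_zero, List.take_zero]
      · have hmN : m.toNat ≤ F.length := by
          rw [hlen1] at hm1; omega
        rw [List.take_append_of_le_length (by simp; omega),
            List.take_append_of_le_length hmN]
    rw [hFP]
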